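-- pv_equiv track=rewrite | github.com/renaissance-codes/leetcode | src/leetcode/python3/leetcode1042.py | gardenNoAdj
-- ===== SOURCE A (Python) =====
-- from typing import List
--
-- def gardenNoAdj(N: int, paths: List[List[int]]) -> List[int]:
--     if len(paths) == 0:
--         return [1] * N
--
--     x_set = set()
--     path_dict = {}
--     for x, y in paths:
--         if x > y:
--             path_dict.setdefault(x - 1, set())
--             path_dict[x - 1].add(y - 1)
--         else:
--             path_dict.setdefault(y - 1, set())
--             path_dict[y - 1].add(x - 1)
--     result = []
--     for x in range(N):
--         if x not in path_dict:
--             result.append(1)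
--             continue
--         x_set = {result[j] for j in path_dict[x]}
--         for j in range(1, N + 1):
--             if j not in x_set:
--                 result.append(j)
--                 break
--
--     return result
-- ===== SOURCE B (Python) =====
-- from typing import List
--
-- def gardenNoAdj(N: int, paths: List[List[int]]) -> List[int]:
--     # push-style greedy: ignore edges that do not name two distinct gardens in
--     # 1..N, push each assigned color forward to the garden's higher-numbered
--     # neighbours, and pick the smallest color not yet forced on each garden.
--     fwd = [[] for _ in range(N)]          # edges from lower garden to higher
--     for x, y in paths:
--         if 1 <= x <= N and 1 <= y <= N and x != y:
--             a, b = (x, y) if x < y else (y, x)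
--             fwd[a - 1].append(b - 1)
--     used = [set() for _ in range(N)]      # colors forced on each garden so far
--     ans = []
--     for i in range(N):
--         c = next(c for c in range(1, N + 2) if c not in used[i])
--         ans.append(c)
--         for j in fwd[i]:
--             used[j].add(c)
--     return ans
-- ===== Notes on version B (the rewrite author's own statement) =====
-- stated objective: alternative
-- what changed: A colors gardens by pulling the colors of smaller-numbered neighbours out of the result list through a dict of sets keyed by the larger endpoint; B instead filters the edges to valid distinct gardens in 1..N, builds a lower-to-higher adjacency list, and after coloring each garden pushes that color forward onto its higher-numbered neighbours, so no neighbour-color lookup happens at coloring time.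
-- outside the precondition, e.g. on gardenNoAdj(2, [[0, 2]]): A returns [1, 2], B returns [1, 1]; on gardenNoAdj(1, [[1, 1]]): A raises IndexError, B returns [1]
import Mathlib
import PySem

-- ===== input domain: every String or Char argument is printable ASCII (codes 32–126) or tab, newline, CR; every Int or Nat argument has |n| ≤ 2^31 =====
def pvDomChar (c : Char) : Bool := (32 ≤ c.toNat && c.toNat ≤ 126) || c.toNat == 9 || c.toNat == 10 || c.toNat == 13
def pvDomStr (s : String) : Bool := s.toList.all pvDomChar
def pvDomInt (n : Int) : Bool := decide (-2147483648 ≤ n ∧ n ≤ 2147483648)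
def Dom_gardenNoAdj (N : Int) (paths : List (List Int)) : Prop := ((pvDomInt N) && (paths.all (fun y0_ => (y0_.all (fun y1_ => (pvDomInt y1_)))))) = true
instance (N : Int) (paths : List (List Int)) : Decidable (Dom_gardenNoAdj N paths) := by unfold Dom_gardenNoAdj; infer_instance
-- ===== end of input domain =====

-- B re-implements the greedy coloring by PUSHING each assigned color forward to the
-- garden's higher-numbered neighbours (symmetric work done once, no neighbour-color
-- lookup at coloring time), instead of A's PULL through a dict keyed by the larger
-- endpoint; same cost, alternative algorithmic decomposition.

-- ===== PORT A =====
-- one edge of the for-loop building path_dict ('setdefault' then in-place 'add' =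
-- overwrite-in-place insert of the grown set)
def pvADictStep (d : PySem.Dict Int (PySem.Set Int)) (p : List Int) : PySem.Dict Int (PySem.Set Int) :=
  match p with
  | [x, y] =>
    if x > y then
      d.insert (x - 1) (PySem.Set.add (d.getD (x - 1) PySem.Set.empty) (y - 1))
    else
      d.insert (y - 1) (PySem.Set.add (d.getD (y - 1) PySem.Set.empty) (x - 1))
  | _ => d   -- Python raises ValueError (unpacking) on a non-pair; excluded by Pre_

-- one iteration of the 'for x in range(N)' loop: raw result[j] totalised with
-- default 0 (Pre_ keeps every index in range); the inner 'for j in range(1, N+1):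
-- … break' is the first hit of the scan, i.e. find?
def pvAStep (N : Int) (pd : PySem.Dict Int (PySem.Set Int)) (result : List Int) (x : Int) : List Int :=
  if pd.contains x = false then result ++ [1]
  else
    let xset : PySem.Set Int :=
      PySem.Set.ofList ((pd.getD x PySem.Set.empty).map (fun j => PySem.List.pyGetD result j 0))
    match (PySem.List.pyRange 1 (N + 1) 1).find? (fun j => !(PySem.Set.contains xset j)) with
    | some j => result ++ [j]
    | none => result   -- loop falls through without a break: nothing appended

def gardenNoAdj (N : Int) (paths : List (List Int)) : List Int :=
  if paths.length = 0 then List.replicate N.toNat 1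
  else (PySem.List.pyRange 0 N 1).foldl (pvAStep N (paths.foldl pvADictStep PySem.Dict.empty)) []

-- ===== PORT B =====
-- one edge of the loop filling fwd: validity filter, then fwd[a-1].append(b-1)
-- (in-place list update)
def pvBFwdStep (N : Int) (fwd : List (List Int)) (p : List Int) : List (List Int) :=
  match p with
  | [x, y] =>
    if 1 ≤ x ∧ x ≤ N ∧ 1 ≤ y ∧ y ≤ N ∧ x ≠ y then
      let a := if x < y then x else y
      let b := if x < y then y else x
      PySem.List.pySetD fwd (a - 1) (PySem.List.pyGetD fwd (a - 1) [] ++ [b - 1])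
    else fwd
  | _ => fwd   -- Python raises ValueError (unpacking) on a non-pair; excluded by Pre_

-- one iteration of 'for i in range(N)': state = (ans, used); next(...) totalised
-- with default 0 (the generator never exhausts under Pre_); then the push loop
def pvBStep (N : Int) (fwd : List (List Int)) (st : List Int × List (PySem.Set Int)) (i : Int) :
    List Int × List (PySem.Set Int) :=
  let c := ((PySem.List.pyRange 1 (N + 2) 1).find?
      (fun c => !(PySem.Set.contains (PySem.List.pyGetD st.2 i PySem.Set.empty) c))).getD 0
  (st.1 ++ [c],
   (PySem.List.pyGetD fwd i []).foldl
     (fun u j => PySem.List.pySetD u j (PySem.Set.add (PySem.List.pyGetD u j PySem.Set.empty) c)) st.2)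

def gardenNoAdj_alt (N : Int) (paths : List (List Int)) : List Int :=
  ((PySem.List.pyRange 0 N 1).foldl
    (pvBStep N (paths.foldl (pvBFwdStep N) ((PySem.List.pyRange 0 N 1).map (fun _ => []))))
    ([], (PySem.List.pyRange 0 N 1).map (fun _ => PySem.Set.empty))).1

-- ===== PRECONDITION & SPEC =====
def pvOkPath (N : Int) (p : List Int) : Bool :=
  match p with
  | [x, y] => decide (1 ≤ max x y ∧ max x y ≤ N → 1 ≤ min x y ∧ x ≠ y)
  | _ => false

-- Pre_ requires every path to be a two-element edge and, whenever the edge's larger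
-- endpoint names a garden in 1..N (so A consumes the edge), its smaller endpoint to
-- be a distinct garden ≥ 1 too: outside that A either raises (malformed edge lists,
-- reachable self-loops, far-negative endpoints) or returns values shaped by Python's
-- negative-index wraparound into the partial result list, an accident B's validated
-- adjacency list should not reproduce.
def Pre_gardenNoAdj (N : Int) (paths : List (List Int)) : Prop :=
  paths.all (pvOkPath N) = true

instance (N : Int) (paths : List (List Int)) : Decidable (Pre_gardenNoAdj N paths) := by
  unfold Pre_gardenNoAdj; infer_instance

def pvWitness_gardenNoAdj : Int × List (List Int) := (4, [[1, 2], [2, 3], [3, 4], [4, 1], [1, 3]])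

def Spec_gardenNoAdj (N : Int) (paths : List (List Int)) (out : List Int) : Prop := out = gardenNoAdj_alt N paths
instance (N : Int) (paths : List (List Int)) (out : List Int) : Decidable (Spec_gardenNoAdj N paths out) := by unfold Spec_gardenNoAdj; infer_instance

-- ===== CLAIM (what is proved, stated in full; the proofs are below) =====
def Claim_equal_gardenNoAdj : Prop := ∀ (N : Int) (paths : List (List Int)), Dom_gardenNoAdj N paths → Pre_gardenNoAdj N paths → Spec_gardenNoAdj N paths (gardenNoAdj N paths)

-- ===== LEMMAS AND PROOFS =====

-- the (directed low → high) edge a→b that a two-element path [x,y] of `paths` induces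
def pvEdge (paths : List (List Int)) (a b : Int) : Prop :=
  ∃ p ∈ paths, ∃ x y : Int, p = [x, y] ∧ min x y - 1 = a ∧ max x y - 1 = b

lemma pvOk_iff {N : Int} {p : List Int} :
    pvOkPath N p = true ↔ ∃ x y : Int, p = [x, y] ∧
      (1 ≤ max x y ∧ max x y ≤ N → 1 ≤ min x y ∧ x ≠ y) := by
  rcases p with _ | ⟨x, _ | ⟨y, _ | ⟨z, t⟩⟩⟩ <;> simp [pvOkPath]
  omega

-- the edges B keeps: both endpoints valid distinct gardens
def pvVEdge (N : Int) (paths : List (List Int)) (a b : Int) : Prop :=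
  ∃ p ∈ paths, ∃ x y : Int, p = [x, y] ∧ (1 ≤ x ∧ x ≤ N ∧ 1 ≤ y ∧ y ≤ N ∧ x ≠ y) ∧
    min x y - 1 = a ∧ max x y - 1 = b

lemma pvVEdge_bounds {N : Int} {paths : List (List Int)} {a b : Int}
    (h : pvVEdge N paths a b) : 0 ≤ a ∧ a < b ∧ b < N := by
  obtain ⟨p, hp, x, y, rfl, ⟨h1, h2, h3, h4, h5⟩, ha, hb⟩ := h
  rcases lt_trichotomy x y with hxy | hxy | hxy
  · rw [min_eq_left hxy.le] at ha; rw [max_eq_right hxy.le] at hb; omega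
  · exact absurd hxy h5
  · rw [min_eq_right hxy.le] at ha; rw [max_eq_left hxy.le] at hb; omega

lemma pvVEdge_edge {N : Int} {paths : List (List Int)} {a b : Int}
    (h : pvVEdge N paths a b) : pvEdge paths a b := by
  obtain ⟨p, hp, x, y, hpx, _, ha, hb⟩ := h
  exact ⟨p, hp, x, y, hpx, ha, hb⟩

-- under Pre_, every edge A consumes (key 0 ≤ b < N) is an edge B keeps
lemma pvEdge_vedge {N : Int} {paths : List (List Int)} {a b : Int}
    (hok : ∀ p ∈ paths, pvOkPath N p = true) (hb0 : 0 ≤ b) (hbN : b < N)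
    (h : pvEdge paths a b) : pvVEdge N paths a b := by
  obtain ⟨p, hp, x, y, rfl, ha, hb⟩ := h
  obtain ⟨x', y', heq, himp⟩ := pvOk_iff.mp (hok _ hp)
  obtain ⟨rfl, rfl⟩ : x = x' ∧ y = y' := by simpa using heq
  have hmm := himp ⟨by omega, by omega⟩
  refine ⟨[x, y], hp, x, y, rfl, ?_, ha, hb⟩
  have hx1 : min x y ≤ x ∧ x ≤ max x y := ⟨min_le_left x y, le_max_left x y⟩
  have hy1 : min x y ≤ y ∧ y ≤ max x y := ⟨min_le_right x y, le_max_right x y⟩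
  exact ⟨by omega, by omega, by omega, by omega, hmm.2⟩

lemma pvVEdge_append {N : Int} {paths : List (List Int)} {p : List Int} {a b : Int} :
    pvVEdge N (paths ++ [p]) a b ↔
      pvVEdge N paths a b ∨ (∃ x y : Int, p = [x, y] ∧
        (1 ≤ x ∧ x ≤ N ∧ 1 ≤ y ∧ y ≤ N ∧ x ≠ y) ∧ min x y - 1 = a ∧ max x y - 1 = b) := by
  constructor
  · rintro ⟨q, hq, hrest⟩
    rcases List.mem_append.mp hq with h | h
    · exact Or.inl ⟨q, h, hrest⟩
    · exact Or.inr (by simpa [List.mem_singleton.mp h] using hrest)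
  · rintro (⟨q, hq, hrest⟩ | h)
    · exact ⟨q, List.mem_append.mpr (Or.inl hq), hrest⟩
    · exact ⟨p, List.mem_append.mpr (Or.inr (List.mem_singleton.mpr rfl)), h⟩

lemma pvEdge_append {paths : List (List Int)} {p : List Int} {a b : Int} :
    pvEdge (paths ++ [p]) a b ↔
      pvEdge paths a b ∨ (∃ x y : Int, p = [x, y] ∧ min x y - 1 = a ∧ max x y - 1 = b) := by
  constructor
  · rintro ⟨q, hq, hrest⟩
    rcases List.mem_append.mp hq with h | h
    · exact Or.inl ⟨q, h, hrest⟩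
    · exact Or.inr (by simpa [List.mem_singleton.mp h] using hrest)
  · rintro (⟨q, hq, hrest⟩ | h)
    · exact ⟨q, List.mem_append.mpr (Or.inl hq), hrest⟩
    · exact ⟨p, List.mem_append.mpr (Or.inr (List.mem_singleton.mpr rfl)), h⟩

-- characterisation of A's dict
lemma pvDict_mem (paths : List (List Int)) (a b : Int) :
    a ∈ (paths.foldl pvADictStep PySem.Dict.empty).getD b PySem.Set.empty ↔ pvEdge paths a b := by
  induction paths using List.reverseRecOn with
  | nil => simp [pvEdge, PySem.Dict.getD_empty]
  | append_singleton ps p ih =>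
    simp only [show (PySem.Set.empty : PySem.Set Int) = [] from rfl] at ih
    rw [List.foldl_append, List.foldl_cons, List.foldl_nil, pvEdge_append]
    rcases p with _ | ⟨x, _ | ⟨y, _ | ⟨z, t⟩⟩⟩
    · simp [pvADictStep, ih]
    · simp [pvADictStep, ih]
    · simp only [pvADictStep]
      split_ifs with hxy
      · rw [PySem.Dict.getD_insert]
        by_cases hb : b = x - 1
        · subst hb
          simp [PySem.Set.mem_add, ih, eq_comm, hxy.le]
        · have hb' : ¬ (x - 1 = b) := fun h => hb h.symm
          simp [hb, hb', ih, max_eq_left hxy.le]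
      · rw [PySem.Dict.getD_insert]
        have hxy' : x ≤ y := not_lt.mp hxy
        by_cases hb : b = y - 1
        · subst hb
          simp [PySem.Set.mem_add, ih, eq_comm, hxy']
        · have hb' : ¬ (y - 1 = b) := fun h => hb h.symm
          simp [hb, hb', ih, max_eq_right hxy']
    · simp [pvADictStep, ih]

lemma pvDict_contains (paths : List (List Int)) (b : Int) :
    (paths.foldl pvADictStep PySem.Dict.empty).contains b = true ↔ ∃ a, pvEdge paths a b := by
  induction paths using List.reverseRecOn with
  | nil => simp [pvEdge, PySem.Dict.contains_empty]
  | append_singleton ps p ih =>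
    rw [List.foldl_append, List.foldl_cons, List.foldl_nil]
    have hE : ∀ a : Int, pvEdge (ps ++ [p]) a b ↔
        (pvEdge ps a b ∨ (∃ x y : Int, p = [x, y] ∧ min x y - 1 = a ∧ max x y - 1 = b)) :=
      fun a => pvEdge_append
    simp only [hE, exists_or]
    rcases p with _ | ⟨x, _ | ⟨y, _ | ⟨z, t⟩⟩⟩
    · simp [pvADictStep, ih]
    · simp [pvADictStep, ih]
    · simp only [pvADictStep]
      split_ifs with hxy
      · rw [PySem.Dict.contains_insert]
        by_cases hb : b = x - 1
        · subst hb
          simp [hxy.le]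
        · have hb' : ¬ (x - 1 = b) := fun h => hb h.symm
          simp [hb, hb', ih, max_eq_left hxy.le]
      · rw [PySem.Dict.contains_insert]
        have hxy' : x ≤ y := not_lt.mp hxy
        by_cases hb : b = y - 1
        · subst hb
          simp [hxy']
        · have hb' : ¬ (y - 1 = b) := fun h_ => hb h_.symm
          simp [hb, hb', ih, max_eq_right hxy']
    · simp [pvADictStep, ih]

-- pyGetD after pySetD, Int indices in range
lemma pvGetD_setD {α : Type} (u : List α) (i j : Int) (v d : α)
    (h0 : 0 ≤ i) (_h1 : i < (u.length : Int)) (h2 : 0 ≤ j) (h3 : j < (u.length : Int)) :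
    PySem.List.pyGetD (PySem.List.pySetD u i v) j d = if j = i then v else PySem.List.pyGetD u j d := by
  rw [PySem.List.pySetD_of_nonneg _ _ h0,
    PySem.List.pyGetD_eq_getElem _ _ h2 (by simpa using h3),
    List.getElem_set]
  split_ifs with hij hji hji
  · rfl
  · omega
  · omega
  · rw [PySem.List.pyGetD_eq_getElem _ _ h2 h3]

lemma pvFwd_length (N : Int) (paths : List (List Int)) (init : List (List Int)) :
    (paths.foldl (pvBFwdStep N) init).length = init.length := by
  induction paths generalizing init with
  | nil => rfl
  | cons p ps ih =>
    rw [List.foldl_cons, ih]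
    rcases p with _ | ⟨x, _ | ⟨y, _ | ⟨z, t⟩⟩⟩ <;>
      · simp only [pvBFwdStep]
        try split_ifs
        all_goals simp [PySem.List.length_pySetD]

-- membership after appending one forward edge lo→hi (1-based) to the adjacency list
lemma pvFwd_setD_mem (N a b lo hi : Int) (F : List (List Int)) (hlen : F.length = N.toNat)
    (hlo0 : 1 ≤ lo) (hloN : lo ≤ N) (ha0 : 0 ≤ a) (haN : a < N) :
    b ∈ PySem.List.pyGetD
        (PySem.List.pySetD F (lo - 1) (PySem.List.pyGetD F (lo - 1) [] ++ [hi - 1])) a []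
      ↔ b ∈ PySem.List.pyGetD F a [] ∨ (lo - 1 = a ∧ hi - 1 = b) := by
  rw [pvGetD_setD _ _ _ _ _ (by omega) (by omega : lo - 1 < (F.length : Int)) ha0
    (by omega : a < (F.length : Int))]
  by_cases ha : a = lo - 1
  · rw [if_pos ha, List.mem_append, List.mem_singleton, ← ha]
    constructor
    · rintro (h | rfl)
      · exact Or.inl h
      · exact Or.inr ⟨rfl, rfl⟩
    · rintro (h | ⟨_, rfl⟩)
      · exact Or.inl h
      · exact Or.inr rfl
  · rw [if_neg ha]
    constructor
    · exact Or.inl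
    · rintro (h | ⟨hpa, _⟩)
      · exact h
      · exact absurd hpa.symm ha

-- characterisation of B's forward adjacency list
lemma pvFwd_mem (N : Int) (paths : List (List Int))
    (a b : Int) (ha0 : 0 ≤ a) (haN : a < N) :
    b ∈ PySem.List.pyGetD
        (paths.foldl (pvBFwdStep N) ((PySem.List.pyRange 0 N 1).map (fun _ => ([] : List Int)))) a []
      ↔ pvVEdge N paths a b := by
  induction paths using List.reverseRecOn with
  | nil =>
    rw [List.foldl_nil,
      PySem.List.pyGetD_map_pyRange_of_nonneg (fun _ => ([] : List Int)) N a [] ha0 haN]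
    simp [pvVEdge]
  | append_singleton ps p ih =>
    rw [List.foldl_append, List.foldl_cons, List.foldl_nil, pvVEdge_append]
    have hlen : (ps.foldl (pvBFwdStep N)
        ((PySem.List.pyRange 0 N 1).map (fun _ => ([] : List Int)))).length = N.toNat := by
      rw [pvFwd_length, List.length_map, PySem.List.length_pyRange_one]; simp
    rcases p with _ | ⟨x, _ | ⟨y, _ | ⟨z, t⟩⟩⟩
    · rw [show ∀ F, pvBFwdStep N F [] = F from fun _ => rfl, ih]
      simp
    · rw [show ∀ F, pvBFwdStep N F [x] = F from fun _ => rfl, ih]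
      simp
    · simp only [pvBFwdStep]
      split_ifs with hv hxy
      · -- valid edge, x < y
        rw [pvFwd_setD_mem N a b x y _ hlen (by omega) (by omega) ha0 haN, ih]
        constructor
        · rintro (h | ⟨hpa, hpb⟩)
          · exact Or.inl h
          · exact Or.inr ⟨x, y, rfl, hv, by omega, by omega⟩
        · rintro (h | ⟨x', y', heq, _, hpa, hpb⟩)
          · exact Or.inl h
          · obtain ⟨rfl, rfl⟩ : x = x' ∧ y = y' := by simpa using heq
            exact Or.inr ⟨by omega, by omega⟩
      · -- valid edge, y < x
        have hyx : y < x := by rcases hv with ⟨_, _, _, _, h5⟩; omega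
        rw [pvFwd_setD_mem N a b y x _ hlen (by omega) (by omega) ha0 haN, ih]
        constructor
        · rintro (h | ⟨hpa, hpb⟩)
          · exact Or.inl h
          · exact Or.inr ⟨x, y, rfl, hv, by omega, by omega⟩
        · rintro (h | ⟨x', y', heq, _, hpa, hpb⟩)
          · exact Or.inl h
          · obtain ⟨rfl, rfl⟩ : x = x' ∧ y = y' := by simpa using heq
            exact Or.inr ⟨by omega, by omega⟩
      · -- invalid edge: dropped
        rw [ih]
        constructor
        · exact Or.inl
        · rintro (h | ⟨x', y', heq, hval, _, _⟩)
          · exact h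
          · obtain ⟨rfl, rfl⟩ : x = x' ∧ y = y' := by simpa using heq
            exact absurd hval hv
    · rw [show ∀ F, pvBFwdStep N F (x :: y :: z :: t) = F from fun _ => rfl, ih]
      simp

-- membership after B's push loop
lemma pvPush (c : Int) (L : List Int) (u : List (PySem.Set Int))
    (hL : ∀ j ∈ L, 0 ≤ j ∧ j < (u.length : Int)) :
    (L.foldl (fun u j =>
        PySem.List.pySetD u j (PySem.Set.add (PySem.List.pyGetD u j PySem.Set.empty) c)) u).length
        = u.length ∧
    ∀ j : Int, 0 ≤ j → j < (u.length : Int) → ∀ e : Int,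
      (e ∈ PySem.List.pyGetD
          (L.foldl (fun u j =>
            PySem.List.pySetD u j (PySem.Set.add (PySem.List.pyGetD u j PySem.Set.empty) c)) u)
          j PySem.Set.empty
        ↔ e ∈ PySem.List.pyGetD u j PySem.Set.empty ∨ (j ∈ L ∧ e = c)) := by
  induction L generalizing u with
  | nil => exact ⟨rfl, fun j _ _ e => by simp⟩
  | cons j0 L' ih =>
    obtain ⟨hj00, hj0N⟩ := hL j0 (by simp)
    have hlen1 : (PySem.List.pySetD u j0
        (PySem.Set.add (PySem.List.pyGetD u j0 PySem.Set.empty) c)).length = u.length :=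
      PySem.List.length_pySetD _ _ _
    have hL' : ∀ j ∈ L', 0 ≤ j ∧ j < ((PySem.List.pySetD u j0
        (PySem.Set.add (PySem.List.pyGetD u j0 PySem.Set.empty) c)).length : Int) := by
      intro j hj; rw [hlen1]; exact hL j (by simp [hj])
    obtain ⟨ihlen, ihmem⟩ := ih _ hL'
    rw [List.foldl_cons]
    refine ⟨by rw [ihlen, hlen1], fun j hj0 hjN e => ?_⟩
    rw [ihmem j hj0 (by rw [hlen1]; exact hjN),
      pvGetD_setD _ _ _ _ _ hj00 hj0N hj0 hjN]
    by_cases hjj : j = j0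
    · subst hjj
      rw [if_pos rfl]
      simp only [PySem.Set.mem_add, List.mem_cons]
      tauto
    · rw [if_neg hjj]
      simp only [List.mem_cons]
      tauto

-- find? on a strictly increasing list returns an element ≤ any satisfying member
lemma pvFind_min {l : List Int} (hl : l.Pairwise (· < ·)) {p : Int → Bool} {m w : Int}
    (hf : l.find? p = some m) (hw : w ∈ l) (hpw : p w = true) : m ≤ w := by
  induction l with
  | nil => cases hf
  | cons x t ih =>
    rcases List.pairwise_cons.mp hl with ⟨hx, ht⟩
    by_cases hpx : p x = true
    · rw [List.find?_cons_of_pos hpx] at hf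
      obtain rfl : x = m := by simpa using hf
      rcases List.mem_cons.mp hw with rfl | h
      · exact le_refl _
      · exact (hx _ h).le
    · rw [List.find?_cons_of_neg hpx] at hf
      rcases List.mem_cons.mp hw with rfl | h
      · exact absurd hpw hpx
      · exact ih ht hf h

-- snoc getD
lemma pvGetD_snoc_lt (r : List Int) (m : Int) (a : Nat) (h : a < r.length) :
    (r ++ [m]).getD a 0 = r.getD a 0 := by
  rw [List.getD_eq_getElem?_getD, List.getD_eq_getElem?_getD, List.getElem?_append_left h]

lemma pvGetD_snoc_self (r : List Int) (m : Int) :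
    (r ++ [m]).getD r.length 0 = m := by
  rw [List.getD_eq_getElem?_getD]
  simp

lemma pvContains_true {s : PySem.Set Int} {c : Int} (h : c ∈ s) :
    PySem.Set.contains s c = true := (PySem.Set.contains_iff _ _).mpr h

lemma pvContains_false {s : PySem.Set Int} {c : Int} (h : c ∉ s) :
    PySem.Set.contains s c = false := by
  cases hb : PySem.Set.contains s c
  · rfl
  · exact absurd ((PySem.Set.contains_iff _ _).mp hb) h

-- loop invariant after k iterations of the coloring loop (state of B; A's result equal)
def pvInv (N : Int) (paths : List (List Int)) (k : Nat) (r : List Int)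
    (u : List (PySem.Set Int)) : Prop :=
  r.length = k ∧ u.length = N.toNat ∧
  (∀ a : Nat, a < k → 1 ≤ r.getD a 0 ∧ r.getD a 0 ≤ (a : Int) + 1) ∧
  (∀ j : Nat, k ≤ j → j < N.toNat → ∀ c : Int,
    (c ∈ PySem.List.pyGetD u (j : Int) PySem.Set.empty ↔
      ∃ a : Nat, a < k ∧ pvVEdge N paths (a : Int) (j : Int) ∧ r.getD a 0 = c))

lemma pvMain (N : Int) (paths : List (List Int)) (hN : 0 ≤ N)
    (hok : ∀ p ∈ paths, pvOkPath N p = true) (k : Nat) (hk : k ≤ N.toNat) :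
    (((List.range k).map (fun a : Nat => (a : Int))).foldl
        (pvAStep N (paths.foldl pvADictStep PySem.Dict.empty)) [] =
      (((List.range k).map (fun a : Nat => (a : Int))).foldl
        (pvBStep N (paths.foldl (pvBFwdStep N) ((PySem.List.pyRange 0 N 1).map (fun _ => []))))
        ([], (PySem.List.pyRange 0 N 1).map (fun _ => PySem.Set.empty))).1) ∧
    pvInv N paths k
      (((List.range k).map (fun a : Nat => (a : Int))).foldl
        (pvBStep N (paths.foldl (pvBFwdStep N) ((PySem.List.pyRange 0 N 1).map (fun _ => []))))
        ([], (PySem.List.pyRange 0 N 1).map (fun _ => PySem.Set.empty))).1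
      (((List.range k).map (fun a : Nat => (a : Int))).foldl
        (pvBStep N (paths.foldl (pvBFwdStep N) ((PySem.List.pyRange 0 N 1).map (fun _ => []))))
        ([], (PySem.List.pyRange 0 N 1).map (fun _ => PySem.Set.empty))).2 := by
  induction k with
  | zero =>
    refine ⟨rfl, rfl, ?_, ?_, ?_⟩
    · simp [PySem.List.length_pyRange_one]
    · intro a ha; omega
    · intro j hj hjN c
      rw [show (((List.range 0).map (fun a : Nat => (a : Int))).foldl
          (pvBStep N (paths.foldl (pvBFwdStep N) ((PySem.List.pyRange 0 N 1).map (fun _ => []))))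
          ([], (PySem.List.pyRange 0 N 1).map (fun _ => PySem.Set.empty))).2
          = (PySem.List.pyRange 0 N 1).map (fun _ => PySem.Set.empty) from rfl,
        PySem.List.pyGetD_map_pyRange_of_nonneg (fun _ => PySem.Set.empty) N (j : Int)
          PySem.Set.empty (by omega) (by omega)]
      simp
  | succ k ihk =>
    have hkN : k < N.toNat := by omega
    have hkNi : (k : Int) < N := by omega
    obtain ⟨heq, ihinv⟩ := ihk (by omega)
    obtain ⟨hlr, hlu, hcol, hmem⟩ := ihinv
    set D := paths.foldl pvADictStep PySem.Dict.empty with hD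
    set F := paths.foldl (pvBFwdStep N) ((PySem.List.pyRange 0 N 1).map (fun _ => [])) with hF
    set U0 := (PySem.List.pyRange 0 N 1).map (fun _ => PySem.Set.empty) with hU0
    set stB := ((List.range k).map (fun a : Nat => (a : Int))).foldl (pvBStep N F) ([], U0) with hstB
    have hsucc : ((List.range (k + 1)).map (fun a : Nat => (a : Int))) =
        ((List.range k).map (fun a : Nat => (a : Int))) ++ [(k : Int)] := by
      rw [List.range_succ, List.map_append]; rfl
    rw [hsucc, List.foldl_append, List.foldl_append,
      List.foldl_cons, List.foldl_nil, List.foldl_cons, List.foldl_nil, ← hstB, heq]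
    -- facts about the color set S of garden k
    have hSb : ∀ c, c ∈ PySem.List.pyGetD stB.2 (k : Int) PySem.Set.empty →
        1 ≤ c ∧ c ≤ (k : Int) := by
      intro c hc
      obtain ⟨a, hak, _, hval⟩ := (hmem k le_rfl hkN c).mp hc
      have := hcol a (by omega)
      rw [hval] at this
      omega
    have hnotin : ((k : Int) + 1) ∉ PySem.List.pyGetD stB.2 (k : Int) PySem.Set.empty := by
      intro h; have := hSb _ h; omega
    -- B's smallest-free-color search
    have hwitmem : ((k : Int) + 1) ∈ PySem.List.pyRange 1 (N + 1) 1 :=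
      (PySem.List.mem_pyRange_one).mpr ⟨by omega, by omega⟩
    have hwitp : (fun c => !PySem.Set.contains
        (PySem.List.pyGetD stB.2 (k : Int) PySem.Set.empty) c) ((k : Int) + 1) = true := by
      simp only [pvContains_false hnotin, Bool.not_false]
    have hfindsome : ((PySem.List.pyRange 1 (N + 1) 1).find? (fun c => !PySem.Set.contains
        (PySem.List.pyGetD stB.2 (k : Int) PySem.Set.empty) c)).isSome := by
      rw [List.find?_isSome]
      exact ⟨(k : Int) + 1, hwitmem, hwitp⟩
    obtain ⟨m, hm⟩ := Option.isSome_iff_exists.mp hfindsome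
    have hpm := List.find?_some hm
    have hmmem := List.mem_of_find?_eq_some hm
    have hm1 : 1 ≤ m := ((PySem.List.mem_pyRange_one).mp hmmem).1
    have hmle : m ≤ (k : Int) + 1 :=
      pvFind_min (PySem.List.pairwise_lt_pyRange_one 1 (N + 1)) hm hwitmem hwitp
    have hmnotin : m ∉ PySem.List.pyGetD stB.2 (k : Int) PySem.Set.empty := by
      intro h; rw [pvContains_true h] at hpm; simp at hpm
    have hsplit : PySem.List.pyRange 1 (N + 2) 1 = PySem.List.pyRange 1 (N + 1) 1 ++ [N + 1] := by
      rw [show (N : Int) + 2 = (N + 1) + 1 by ring]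
      exact PySem.List.pyRange_one_succ_right (by omega)
    have hBfind : (PySem.List.pyRange 1 (N + 2) 1).find? (fun c => !PySem.Set.contains
        (PySem.List.pyGetD stB.2 (k : Int) PySem.Set.empty) c) = some m := by
      rw [hsplit, List.find?_append, hm]; rfl
    have hB1 : (pvBStep N F stB (k : Int)).1 = stB.1 ++ [m] := by
      simp only [pvBStep, hBfind, Option.getD_some]
    have hB2 : (pvBStep N F stB (k : Int)).2 =
        (PySem.List.pyGetD F (k : Int) []).foldl (fun u j =>
          PySem.List.pySetD u j (PySem.Set.add (PySem.List.pyGetD u j PySem.Set.empty) m)) stB.2 := by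
      simp only [pvBStep, hBfind, Option.getD_some]
    -- A's step appends the same color m
    have hA : pvAStep N D stB.1 (k : Int) = stB.1 ++ [m] := by
      cases hc : D.contains (k : Int) with
      | false =>
        have hnoedge : ¬ ∃ a, pvEdge paths a (k : Int) := by
          intro h
          have := (pvDict_contains paths (k : Int)).mpr h
          rw [hD] at hc
          rw [hc] at this
          cases this
        have hSempty : ∀ c, c ∉ PySem.List.pyGetD stB.2 (k : Int) PySem.Set.empty := by
          intro c h
          obtain ⟨a, _, he, _⟩ := (hmem k le_rfl hkN c).mp h
          exact hnoedge ⟨_, pvVEdge_edge he⟩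
        have hm1' : m = 1 := by
          rw [PySem.List.pyRange_one_cons (by omega : (1 : Int) < N + 1),
            List.find?_cons_of_pos
              (by simp only [pvContains_false (hSempty 1), Bool.not_false])] at hm
          exact (Option.some_inj.mp hm).symm
        simp [pvAStep, hc, hm1']
      | true =>
        have hxs : ∀ c : Int, c ∈ PySem.Set.ofList ((D.getD (k : Int) PySem.Set.empty).map
            (fun j => PySem.List.pyGetD stB.1 j 0)) ↔
            c ∈ PySem.List.pyGetD stB.2 (k : Int) PySem.Set.empty := by
          intro c
          rw [PySem.Set.mem_ofList, List.mem_map, hmem k le_rfl hkN c]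
          constructor
          · rintro ⟨jv, hjv, hval⟩
            have hedge : pvVEdge N paths jv (k : Int) :=
              pvEdge_vedge hok (by omega) hkNi ((pvDict_mem paths jv (k : Int)).mp hjv)
            have hb := pvVEdge_bounds hedge
            rw [show jv = ((jv.toNat : Nat) : Int) by omega, PySem.List.pyGetD_natCast] at hval
            exact ⟨jv.toNat, by omega, by rwa [← Int.toNat_of_nonneg hb.1] at hedge, hval⟩
          · rintro ⟨a, hak, hedge, hval⟩
            refine ⟨(a : Int), (pvDict_mem paths (a : Int) (k : Int)).mpr (pvVEdge_edge hedge), ?_⟩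
            rw [PySem.List.pyGetD_natCast]
            exact hval
        have hpredeq : (fun j => !PySem.Set.contains (PySem.Set.ofList
            ((D.getD (k : Int) PySem.Set.empty).map (fun j => PySem.List.pyGetD stB.1 j 0))) j) =
            (fun c => !PySem.Set.contains
              (PySem.List.pyGetD stB.2 (k : Int) PySem.Set.empty) c) := by
          funext c
          by_cases h : c ∈ PySem.List.pyGetD stB.2 (k : Int) PySem.Set.empty
          · rw [pvContains_true h, pvContains_true ((hxs c).mpr h)]
          · rw [pvContains_false h, pvContains_false (fun hh => h ((hxs c).mp hh))]
        simp only [pvAStep, hc]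
        rw [if_neg (by simp), hpredeq, hm]
    -- push-loop facts
    have hLmem : ∀ j : Int, j ∈ PySem.List.pyGetD F (k : Int) [] ↔ pvVEdge N paths (k : Int) j :=
      fun j => pvFwd_mem N paths (k : Int) j (by omega) hkNi
    have hLb : ∀ j ∈ PySem.List.pyGetD F (k : Int) [], 0 ≤ j ∧ j < (stB.2.length : Int) := by
      intro j hj
      have := pvVEdge_bounds ((hLmem j).mp hj)
      rw [hlu]; omega
    obtain ⟨hplen, hpmem⟩ := pvPush m (PySem.List.pyGetD F (k : Int) []) stB.2 hLb
    refine ⟨by rw [hA, hB1], ?_, ?_, ?_, ?_⟩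
    · rw [hB1]; simp [hlr]
    · rw [hB2, hplen, hlu]
    · intro a ha
      rw [hB1]
      rcases Nat.lt_succ_iff_lt_or_eq.mp ha with h | rfl
      · rw [pvGetD_snoc_lt _ _ _ (by omega)]
        exact hcol a h
      · rw [show a = stB.1.length from hlr.symm, pvGetD_snoc_self]
        constructor <;> omega
    · intro j hj hjN c
      rw [hB1, hB2, hpmem (j : Int) (by omega) (by rw [hlu]; omega) c]
      constructor
      · rintro (h | ⟨hjL, rfl⟩)
        · obtain ⟨a, hak, hedge, hval⟩ := (hmem j (by omega) hjN c).mp h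
          exact ⟨a, by omega, hedge, by rw [pvGetD_snoc_lt _ _ _ (by omega)]; exact hval⟩
        · exact ⟨k, by omega, (hLmem (j : Int)).mp hjL,
            by rw [show k = stB.1.length from hlr.symm, pvGetD_snoc_self]⟩
      · rintro ⟨a, hak, hedge, hval⟩
        rcases Nat.lt_succ_iff_lt_or_eq.mp hak with h | rfl
        · exact Or.inl ((hmem j (by omega) hjN c).mpr
            ⟨a, h, hedge, by rw [pvGetD_snoc_lt _ _ _ (by omega)] at hval; exact hval⟩)
        · refine Or.inr ⟨(hLmem (j : Int)).mpr hedge, ?_⟩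
          rw [show a = stB.1.length from hlr.symm, pvGetD_snoc_self] at hval
          exact hval.symm


-- ===== VERDICT (by name: the statement is the Claim_ definition above) =====
theorem gardenNoAdj_spec : Claim_equal_gardenNoAdj := by
  intro N paths _ hpre
  have hok : ∀ p ∈ paths, pvOkPath N p = true := fun p hp => List.all_eq_true.mp hpre p hp
  unfold Spec_gardenNoAdj
  rcases lt_or_ge N 0 with hN | hN
  · -- N < 0: range(N) is empty and [1]*N is [], so both sides return []
    have hnil : PySem.List.pyRange 0 N 1 = [] := PySem.List.pyRange_one_eq_nil (by omega)
    unfold gardenNoAdj gardenNoAdj_alt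
    rw [hnil]
    by_cases hp : paths.length = 0
    · rw [if_pos hp]
      simp [Int.toNat_of_nonpos hN.le]
    · rw [if_neg hp]
      rfl
  have hrange : PySem.List.pyRange 0 N 1 = (List.range N.toNat).map (fun a : Nat => (a : Int)) :=
    PySem.List.pyRange_zero N
  obtain ⟨hmain, _⟩ := pvMain N paths hN hok N.toNat le_rfl
  rw [← hrange] at hmain
  unfold gardenNoAdj gardenNoAdj_alt
  by_cases hp : paths.length = 0
  · obtain rfl : paths = [] := List.length_eq_zero_iff.mp hp
    rw [if_pos (by simp : ([] : List (List Int)).length = 0), ← hmain, List.foldl_nil]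
    have hstep : ∀ (r : List Int) (x : Int),
        pvAStep N PySem.Dict.empty r x = r ++ [1] := by
      intro r x; simp [pvAStep, PySem.Dict.contains_empty]
    rw [PySem.List.foldl_congr_mem _ _ (fun (r : List Int) (x : Int) => r ++ [(1 : Int)]) _
      (fun r x _ => hstep r x),
      PySem.List.foldl_append_singleton_eq_map (fun _ : Int => (1 : Int))]
    simp only [hrange, List.map_map]
    rw [show ((fun _ : Int => (1 : Int)) ∘ fun a : Nat => (a : Int)) = fun _ : Nat => (1 : Int) from rfl,
      List.map_const', List.length_range, List.nil_append]
  · rw [if_neg hp]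
    exact hmain
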